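-- pv_equiv track=rewrite | github.com/rerenoob/caesar-vinaigrette | caesar-vinaigrette.py | encryptV
-- ===== SOURCE A (Python) =====
-- def encryptV(string, key, spaces):
--     key_length = len(key)
--     key_as_int = [ord(i) for i in key]
--     string_int = [ord(i) for i in string]
--     plaintext = ''
--     for i in range(len(string_int)):
--         if i in spaces:
--             plaintext += " "
--         value = (string_int[i] + key_as_int[i % key_length]) % 26
--         plaintext += chr(value + 97)
--     return plaintext
-- ===== SOURCE B (Python) =====
-- def encryptV(string, key, spaces):
--     n = len(string)
--     k = len(key)
--     enc = ''.join(chr((ord(c) + ord(key[i % k])) % 26 + 97) for i, c in enumerate(string))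
--     cuts = sorted(set(p for p in spaces if 0 <= p < n))
--     out = []
--     prev = 0
--     for c in cuts:
--         out.append(enc[prev:c])
--         out.append(' ')
--         prev = c
--     out.append(enc[prev:])
--     return ''.join(out)
-- ===== Notes on version B (the rewrite author's own statement) =====
-- stated objective: faster
-- what changed: A fuses encryption and space insertion in one loop with an O(|spaces|) list-membership test per character; B encrypts the whole string in one pass, builds the sorted set of valid cut points once, and splices the encrypted text between consecutive cut points.
import Mathlib
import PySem

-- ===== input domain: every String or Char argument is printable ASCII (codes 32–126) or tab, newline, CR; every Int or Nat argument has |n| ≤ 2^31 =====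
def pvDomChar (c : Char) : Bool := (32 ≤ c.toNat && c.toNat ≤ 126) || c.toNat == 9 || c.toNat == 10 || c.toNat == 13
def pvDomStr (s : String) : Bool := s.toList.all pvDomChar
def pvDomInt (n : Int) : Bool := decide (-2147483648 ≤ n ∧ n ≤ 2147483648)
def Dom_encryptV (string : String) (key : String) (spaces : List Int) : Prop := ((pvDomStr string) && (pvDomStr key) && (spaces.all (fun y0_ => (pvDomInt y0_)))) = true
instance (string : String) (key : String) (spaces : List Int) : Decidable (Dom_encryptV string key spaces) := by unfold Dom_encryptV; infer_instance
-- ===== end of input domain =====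

-- B replaces A's fused loop (per-character membership test + encrypt) by encrypt-once
-- then splice at the sorted set of valid space positions, removing the per-character membership scan; objective: faster.

-- ===== PORT A =====
-- Literal port of A. All char codes and indices are nonnegative, so Python's % is Nat.%;
-- string_int[i] and key_as_int[i % key_length] are in range whenever Python does not raise,
-- so getD is exact there (key_length = 0 with a nonempty string raises in Python; excluded by Pre_).
def encryptV (string : String) (key : String) (spaces : List Int) : String :=
  let key_as_int : List Nat := key.toList.map Char.toNat
  let key_length : Nat := key_as_int.length
  let string_int : List Nat := string.toList.map Char.toNat
  let plaintext : List Char :=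
    (List.range string_int.length).foldl (fun acc (i : Nat) =>
      let acc := if (i : Int) ∈ spaces then acc ++ [' '] else acc
      let value := (string_int.getD i 0 + key_as_int.getD (i % key_length) 0) % 26
      acc ++ [Char.ofNat (value + 97)]) []
  String.ofList plaintext

-- ===== PORT B =====
-- Literal port of Source B: single-pass encryption, then splice at sorted(set(valid positions)).
def encryptV_alt (string : String) (key : String) (spaces : List Int) : String :=
  let s := string.toList
  let n := s.length
  let k := key.toList
  -- enumerate's index is nonnegative, so .toNat and Nat.% are exact here
  let enc : List Char := (PySem.List.enumerate s).map (fun ic =>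
    Char.ofNat ((ic.2.toNat + (k.getD (ic.1.toNat % k.length) ' ').toNat) % 26 + 97))
  let cuts : List Int :=
    PySem.List.sorted (PySem.Set.ofList (spaces.filter (fun p => decide (0 ≤ p ∧ p < (n : Int)))))
      (fun x => x)
  let r := cuts.foldl (fun (op : List Char × Int) c =>
      (op.1 ++ PySem.List.slice enc (some op.2) (some c) ++ [' '], c)) ([], (0 : Int))
  String.ofList (r.1 ++ PySem.List.slice enc (some r.2) none)

-- ===== PRECONDITION & SPEC =====
-- Pre_ excludes only the inputs where Python A raises ZeroDivisionError: empty key with nonempty string.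
def Pre_encryptV (string : String) (key : String) (spaces : List Int) : Prop :=
  string = "" ∨ key ≠ ""
instance (string : String) (key : String) (spaces : List Int) : Decidable (Pre_encryptV string key spaces) := by
  unfold Pre_encryptV; infer_instance
def pvWitness_encryptV : String × String × List Int := ("attack", "key", [2, 4])

def Spec_encryptV (string : String) (key : String) (spaces : List Int) (out : String) : Prop := out = encryptV_alt string key spaces
instance (string : String) (key : String) (spaces : List Int) (out : String) : Decidable (Spec_encryptV string key spaces out) := by unfold Spec_encryptV; infer_instance

-- ===== CLAIM (what is proved, stated in full; the proofs are below) =====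
def Claim_equal_encryptV : Prop := ∀ (string : String) (key : String) (spaces : List Int), Dom_encryptV string key spaces → Pre_encryptV string key spaces → Spec_encryptV string key spaces (encryptV string key spaces)

-- ===== LEMMAS AND PROOFS =====

-- A's fused loop builds the concatenation of per-index cells (optional space, then a char)
theorem pv_foldl_cells {α : Type} (P : α → Prop) [DecidablePred P] (g : α → Char) :
    ∀ (l : List α) (init : List Char),
      l.foldl (fun acc i =>
        (if P i then acc ++ [' '] else acc) ++ [g i]) init
      = init ++ l.flatMap (fun i => (if P i then [' '] else []) ++ [g i]) := by
  intro l
  induction l with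
  | nil => intro init; simp
  | cons a t ih =>
    intro init
    simp only [List.foldl_cons, List.flatMap_cons, ih]
    by_cases h : P a <;> simp [h]

theorem pv_flatMap_congr {α β : Type} (l : List α) (g1 g2 : α → List β)
    (h : ∀ i ∈ l, g1 i = g2 i) : l.flatMap g1 = l.flatMap g2 := by
  induction l with
  | nil => rfl
  | cons a t ih =>
    simp only [List.flatMap_cons]
    rw [h a (by simp), ih (fun i hi => h i (by simp [hi]))]

theorem pv_map_drop_range (f : Nat → Char) (n j : Nat) :
    ((List.range n).map f).drop j = (List.range' j (n - j)).map f := by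
  rw [← List.map_drop, List.range_eq_range', List.drop_range']
  simp

theorem pv_map_range'_take (f : Nat → Char) (a m k : Nat) (h : k ≤ m) :
    ((List.range' a m).map f).take k = (List.range' a k).map f := by
  rw [← List.map_take, List.take_range'_of_length_ge h]

-- the splice loop over strictly increasing cut points in [prev, n) produces exactly the
-- concatenation of cells over range' prev (n - prev)
theorem pv_splice (f : Nat → Char) (n : Nat) :
    ∀ (cs : List Int) (prev : Nat) (out : List Char),
      cs.Pairwise (· < ·) → (∀ c ∈ cs, (prev : Int) ≤ c ∧ c < (n : Int)) →
      (let r := cs.foldl (fun (op : List Char × Int) c =>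
          (op.1 ++ PySem.List.slice ((List.range n).map f) (some op.2) (some c) ++ [' '], c))
          (out, (prev : Int));
        r.1 ++ PySem.List.slice ((List.range n).map f) (some r.2) none)
      = out ++ (List.range' prev (n - prev)).flatMap
          (fun (i : Nat) => (if (i : Int) ∈ cs then [' '] else []) ++ [f i]) := by
  intro cs
  induction cs with
  | nil =>
    intro prev out _ _
    simp only [List.foldl_nil, PySem.List.slice_from_natCast]
    rw [pv_map_drop_range]
    rw [pv_flatMap_congr (List.range' prev (n - prev)) _ (fun (i : Nat) => [f i])
      (by intro i _; simp), ← List.map_eq_flatMap]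
  | cons c t ih =>
    intro prev out hpw hbd
    obtain ⟨hc1, hc2⟩ := hbd c (by simp)
    set cn := c.toNat with hcn
    have hcast : c = (cn : Int) := by omega
    have hple : prev ≤ cn := by omega
    have hcnn : cn < n := by omega
    simp only [List.foldl_cons]
    have hbd' : ∀ x ∈ t, (cn : Int) ≤ x ∧ x < (n : Int) := by
      intro x hx
      exact ⟨by have := (List.pairwise_cons.mp hpw).1 x hx; omega, (hbd x (by simp [hx])).2⟩
    rw [hcast]
    rw [ih cn (out ++ PySem.List.slice ((List.range n).map f) (some (prev : Int)) (some (cn : Int)) ++ [' '])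
        (List.pairwise_cons.mp hpw).2 hbd']
    -- rewrite the slice to a map over range'
    rw [PySem.List.slice_natCast, pv_map_drop_range, pv_map_range'_take f prev (n - prev) (cn - prev) (by omega)]
    -- split the RHS range at cn
    have hsplit : List.range' prev (n - prev) = List.range' prev (cn - prev) ++ List.range' cn (n - cn) := by
      have h1 : n - prev = (cn - prev) + (n - cn) := by omega
      have h2 : prev + (cn - prev) = cn := by omega
      rw [h1, ← List.range'_append_1, h2]
    rw [hsplit, List.flatMap_append]
    -- left part: indices < cn are not in c :: t
    have hleft : (List.range' prev (cn - prev)).flatMap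
        (fun (i : Nat) => (if (i : Int) ∈ (cn : Int) :: t then [' '] else []) ++ [f i])
        = (List.range' prev (cn - prev)).map f := by
      rw [pv_flatMap_congr _ _ (fun (i : Nat) => [f i]), ← List.map_eq_flatMap]
      intro i hi
      have hilt : i < cn := by
        have := List.mem_range'_1.mp hi; omega
      have hnm : ¬ ((i : Int) ∈ (cn : Int) :: t) := by
        intro hmem
        rcases List.mem_cons.mp hmem with h | h
        · omega
        · have := (hbd' _ h).1; omega
      simp [hnm]
    -- right part: head cell at cn, then membership in c :: t equals membership in t
    have hrange : List.range' cn (n - cn) = cn :: List.range' (cn + 1) (n - cn - 1) := by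
      have h3 : n - cn = (n - cn - 1) + 1 := by omega
      rw [h3, List.range'_succ]
      simp
    have hnotmem : ¬ ((cn : Int) ∈ t) := by
      intro h
      have := (List.pairwise_cons.mp hpw).1 _ h
      omega
    have htail : (List.range' (cn + 1) (n - cn - 1)).flatMap
        (fun (i : Nat) => (if (i : Int) ∈ (cn : Int) :: t then [' '] else []) ++ [f i])
        = (List.range' (cn + 1) (n - cn - 1)).flatMap
          (fun (i : Nat) => (if (i : Int) ∈ t then [' '] else []) ++ [f i]) := by
      apply pv_flatMap_congr
      intro i hi
      have higt : cn < i := by have := List.mem_range'_1.mp hi; omega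
      have hne : (i : Int) ≠ (cn : Int) := by omega
      simp [List.mem_cons, hne]
    have hright : (List.range' cn (n - cn)).flatMap
        (fun (i : Nat) => (if (i : Int) ∈ t then [' '] else []) ++ [f i])
        = [f cn] ++ (List.range' (cn + 1) (n - cn - 1)).flatMap
            (fun (i : Nat) => (if (i : Int) ∈ t then [' '] else []) ++ [f i]) := by
      rw [hrange, List.flatMap_cons]
      simp [hnotmem]
    have hright' : (List.range' cn (n - cn)).flatMap
        (fun (i : Nat) => (if (i : Int) ∈ (cn : Int) :: t then [' '] else []) ++ [f i])
        = ([' '] ++ [f cn]) ++ (List.range' (cn + 1) (n - cn - 1)).flatMap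
            (fun (i : Nat) => (if (i : Int) ∈ t then [' '] else []) ++ [f i]) := by
      rw [hrange, List.flatMap_cons, htail]
      simp
    rw [hleft, hright, hright']
    simp

-- ===== VERDICT (by name: the statement is the Claim_ definition above) =====
theorem encryptV_spec : Claim_equal_encryptV := by
  unfold Claim_equal_encryptV
  intro string key spaces _ hpre
  unfold Spec_encryptV encryptV encryptV_alt
  simp only []
  set s := string.toList with hs
  set k := key.toList with hk
  set n := s.length with hn
  -- the common per-index encrypted character
  set f : Nat → Char := fun i =>
    Char.ofNat (((s.getD i ' ').toNat + (k.getD (i % k.length) ' ').toNat) % 26 + 97) with hf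
  -- B's enc is (range n).map f
  have henc : (PySem.List.enumerate s).map (fun ic =>
      Char.ofNat ((ic.2.toNat + (k.getD (ic.1.toNat % k.length) ' ').toNat) % 26 + 97))
      = (List.range n).map f := by
    rw [PySem.List.enumerate_eq_map_pyRange s ' ', PySem.List.len_eq, ← hn,
      PySem.List.pyRange_zero_nat, List.map_map, List.map_map]
    apply List.map_congr_left
    intro i _
    simp [Function.comp, PySem.List.pyGetD_natCast, hf]
  rw [henc]
  -- B's cuts
  set cuts : List Int :=
    PySem.List.sorted (PySem.Set.ofList (spaces.filter (fun p => decide (0 ≤ p ∧ p < (n : Int)))))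
      (fun x => x) with hcuts
  have hmemcuts : ∀ c : Int, c ∈ cuts ↔ (c ∈ spaces ∧ 0 ≤ c ∧ c < (n : Int)) := by
    intro c
    rw [hcuts, PySem.List.mem_sorted, PySem.Set.mem_ofList, List.mem_filter]
    simp
  have hpw : cuts.Pairwise (· < ·) := by
    rw [hcuts]; exact PySem.List.sorted_ofList_pairwise_lt _
  have hbd : ∀ c ∈ cuts, ((0 : Nat) : Int) ≤ c ∧ c < (n : Int) := by
    intro c hc
    have := (hmemcuts c).mp hc
    exact ⟨by exact_mod_cast this.2.1, this.2.2⟩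
  have hB := pv_splice f n cuts 0 [] hpw hbd
  simp only [Nat.cast_zero] at hB
  rw [hB]
  -- A's loop
  simp only [List.length_map]
  rw [← hn]
  rw [pv_foldl_cells (fun i : Nat => (i : Int) ∈ spaces)
      (fun i : Nat => Char.ofNat (((s.map Char.toNat).getD i 0
        + (k.map Char.toNat).getD (i % k.length) 0) % 26 + 97)) (List.range n) []]
  -- both are cell concatenations over range n; compare cells pointwise
  rw [List.nil_append, List.nil_append, Nat.sub_zero, ← List.range_eq_range']
  apply congrArg String.ofList
  apply pv_flatMap_congr
  intro i hi
  have hin : i < n := List.mem_range.mp hi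
  -- with a character present, Pre_ gives a nonempty key
  have hkpos : 0 < k.length := by
    rcases hpre with h | h
    · exfalso
      have : s = [] := by rw [hs, h]; rfl
      rw [this] at hn; simp [hn] at hin
    · have hne : k ≠ [] := by
        intro hknil
        exact h (String.toList_inj.mp (by simp [← hk, hknil]))
      cases hkc : k with
      | nil => exact absurd hkc hne
      | cons a t => simp
  congr 1
  · -- the space condition agrees
    by_cases hsp : (i : Int) ∈ spaces
    · have : (i : Int) ∈ cuts := (hmemcuts _).mpr ⟨hsp, by positivity, by exact_mod_cast hin⟩
      simp [hsp, this]
    · have : ¬ (i : Int) ∈ cuts := fun hc => hsp ((hmemcuts _).mp hc).1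
      simp [hsp, this]
  · -- the encrypted character agrees
    have him : i % k.length < k.length := Nat.mod_lt _ hkpos
    rw [hf]
    simp only [List.getD_eq_getElem?_getD, List.getElem?_map]
    rw [List.getElem?_eq_getElem (by simpa using hin), List.getElem?_eq_getElem (by simpa using him)]
    simp
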